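-- pv_equiv track=rewrite | github.com/patrickmarcel/rankInsightGeneration | RankingFromPairwise.py | split_with_min_cost
-- ===== SOURCE A (Python) =====
-- def compare_cost(a, b, claireTab):
--     """
--     This function should be implemented to return the cost of comparing two objects a and b.
--     """
--     # Placeholder implementation; replace with the actual cost function.
--     result = 0
--     for c in claireTab:
--         if (c[0] == a and c[1] == b) or (c[1] == a and c[0] == b):
--             if c[2]:
--                 result = 0
--             else:
--                 result = 1
--     return result
--
-- def split_with_min_cost(arr, claireTab):
--     """
--     Splits the array into two parts with the minimum comparison cost.
--     """
--     n = len(arr)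
--     min_cost = float('inf')
--     best_split = None
--
--     for i in range(1, n):
--         left = arr[:i]
--         right = arr[i:]
--         cost = sum(compare_cost(x, y, claireTab) for x in left for y in right)
--
--         if cost < min_cost:
--             min_cost = cost
--             best_split = (left, right)
--
--     return best_split
-- ===== SOURCE B (Python) =====
-- def split_with_min_cost(arr, claireTab):
--     """
--     Splits the array into two parts with the minimum comparison cost.
--     Precomputes a pairwise-cost dict from claireTab (last entry wins, as in A),
--     then walks the split point left to right, updating the cost incrementally.
--     """
--     n = len(arr)
--     if n < 2:
--         return None
--
--     cost = {}
--     for a, b, eq in claireTab: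
--         cost[(a, b) if a <= b else (b, a)] = 0 if eq else 1
--
--     def c(x, y):
--         return cost.get((x, y) if x <= y else (y, x), 0)
--
--     cur = sum(c(arr[0], y) for y in arr[1:])
--     best_cost, best_i = cur, 1
--     for i in range(1, n - 1):
--         # move arr[i] from the right part to the left part
--         cur += sum(c(arr[i], y) for y in arr[i + 1:]) - sum(c(x, arr[i]) for x in arr[:i])
--         if cur < best_cost:
--             best_cost, best_i = cur, i + 1
--     return arr[:best_i], arr[best_i:]
-- ===== Notes on version B (the rewrite author's own statement) =====
-- stated objective: faster
-- what changed: B precomputes a pairwise-cost dictionary from claireTab (last matching entry wins, as in A) and then scans the split point once, updating the split cost incrementally by the delta of moving one element, instead of rescanning claireTab for every pair at every split.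
import Mathlib
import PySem

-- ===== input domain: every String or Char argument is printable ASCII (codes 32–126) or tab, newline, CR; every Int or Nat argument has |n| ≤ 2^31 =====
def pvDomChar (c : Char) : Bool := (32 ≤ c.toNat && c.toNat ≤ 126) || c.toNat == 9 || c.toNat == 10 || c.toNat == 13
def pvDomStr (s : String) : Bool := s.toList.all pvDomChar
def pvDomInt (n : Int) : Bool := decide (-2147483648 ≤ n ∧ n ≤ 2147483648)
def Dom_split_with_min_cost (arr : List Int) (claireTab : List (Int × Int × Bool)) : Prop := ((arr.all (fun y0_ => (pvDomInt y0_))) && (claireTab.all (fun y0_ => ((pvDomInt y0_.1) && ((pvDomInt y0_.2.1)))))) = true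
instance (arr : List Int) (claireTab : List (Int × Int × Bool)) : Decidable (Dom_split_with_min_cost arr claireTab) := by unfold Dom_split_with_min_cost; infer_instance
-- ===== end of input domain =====

-- B replaces A's per-pair rescans of claireTab by a precomputed pairwise-cost dict and an
-- incremental (delta-updated) scan of the split point; proved to return A's exact value everywhere.


-- ===== PORT A =====
-- compare_cost: scan claireTab; the LAST matching entry decides (0 if c[2] else 1), default 0.
def compare_cost (a b : Int) (claireTab : List (Int × Int × Bool)) : Int :=
  claireTab.foldl
    (fun result c =>
      if (c.1 = a ∧ c.2.1 = b) ∨ (c.2.1 = a ∧ c.1 = b) then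
        (if c.2.2 then 0 else 1)
      else result) 0

-- one iteration of A's loop body.  Python's float('inf') initial min_cost is modelled as `none`:
-- costs are ints, so `cost < inf` is always true at the first iteration — exact.
def pvStepA (claireTab : List (Int × Int × Bool)) (arr : List Int)
    (st : Option Int × Option (List Int × List Int)) (i : Nat) :
    Option Int × Option (List Int × List Int) :=
  let left := arr.take i
  let right := arr.drop i
  let cost := (left.map (fun x => (right.map (fun y => compare_cost x y claireTab)).sum)).sum
  match st.1 with
  | none => (some cost, some (left, right))
  | some m => if cost < m then (some cost, some (left, right)) else st

-- range(1, n) = List.range' 1 (n-1) (n = len(arr) : Nat); arr[:i] / arr[i:] with 0 ≤ i ≤ n are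
-- List.take / List.drop — exact for these indices.
def split_with_min_cost (arr : List Int) (claireTab : List (Int × Int × Bool)) : Option (List Int × List Int) :=
  (((List.range' 1 (arr.length - 1)).foldl (pvStepA claireTab arr) (none, none))).2

-- ===== PORT B =====
-- normalized unordered-pair key: (a, b) if a <= b else (b, a)
def pvKey (x y : Int) : Int × Int := if x ≤ y then (x, y) else (y, x)

-- the cost dict built once from claireTab (later entries overwrite earlier ones)
def pvCostDict (claireTab : List (Int × Int × Bool)) : PySem.Dict (Int × Int) Int :=
  claireTab.foldl (fun d c => d.insert (pvKey c.1 c.2.1) (if c.2.2 then 0 else 1)) PySem.Dict.empty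

-- c(x, y) = cost.get(key, 0)
def pvLook (d : PySem.Dict (Int × Int) Int) (x y : Int) : Int := d.getD (pvKey x y) 0

-- cur = sum(c(arr[0], y) for y in arr[1:]); arr[0] via PySem.List.pyGetD (0 < len, in range: exact)
def pvCur0 (d : PySem.Dict (Int × Int) Int) (arr : List Int) : Int :=
  ((arr.drop 1).map (fun y => pvLook d (PySem.List.pyGetD arr 0 0) y)).sum

-- one iteration of B's loop body: state (cur, best_cost, best_i); arr[i] with 0 ≤ i < n in range: exact
def pvStepB (d : PySem.Dict (Int × Int) Int) (arr : List Int)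
    (s : Int × Int × Nat) (i : Nat) : Int × Int × Nat :=
  let ai := PySem.List.pyGetD arr (i : Int) 0
  let cur' := s.1 + ((arr.drop (i + 1)).map (fun y => pvLook d ai y)).sum
                  - ((arr.take i).map (fun x => pvLook d x ai)).sum
  if cur' < s.2.1 then (cur', cur', i + 1) else (cur', s.2.1, s.2.2)

def split_with_min_cost_alt (arr : List Int) (claireTab : List (Int × Int × Bool)) : Option (List Int × List Int) :=
  if arr.length < 2 then none
  else
    let d := pvCostDict claireTab
    let st := (List.range' 1 (arr.length - 2)).foldl (pvStepB d arr) (pvCur0 d arr, pvCur0 d arr, 1)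
    some (arr.take st.2.2, arr.drop st.2.2)

-- ===== PRECONDITION & SPEC =====
def Spec_split_with_min_cost (arr : List Int) (claireTab : List (Int × Int × Bool)) (out : Option (List Int × List Int)) : Prop := out = split_with_min_cost_alt arr claireTab
instance (arr : List Int) (claireTab : List (Int × Int × Bool)) (out : Option (List Int × List Int)) : Decidable (Spec_split_with_min_cost arr claireTab out) := by unfold Spec_split_with_min_cost; infer_instance

-- ===== CLAIM (what is proved, stated in full; the proofs are below) =====
def Claim_equal_split_with_min_cost : Prop := ∀ (arr : List Int) (claireTab : List (Int × Int × Bool)), Dom_split_with_min_cost arr claireTab → Spec_split_with_min_cost arr claireTab (split_with_min_cost arr claireTab)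

-- ===== LEMMAS AND PROOFS =====

-- A's match condition is exactly equality of normalized keys.
theorem pvKey_match (c0 c1 a b : Int) :
    ((c0 = a ∧ c1 = b) ∨ (c1 = a ∧ c0 = b)) ↔ pvKey c0 c1 = pvKey a b := by
  simp only [pvKey, Prod.ext_iff]
  split_ifs <;> omega

-- compare_cost = lookup in the precomputed dict.
theorem compare_cost_eq_look (a b : Int) (claireTab : List (Int × Int × Bool)) :
    compare_cost a b claireTab = pvLook (pvCostDict claireTab) a b := by
  suffices h : ∀ (ct : List (Int × Int × Bool)) (d : PySem.Dict (Int × Int) Int),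
      (ct.foldl (fun result c =>
        if (c.1 = a ∧ c.2.1 = b) ∨ (c.2.1 = a ∧ c.1 = b) then
          (if c.2.2 then 0 else 1) else result) (d.getD (pvKey a b) 0))
      = pvLook (ct.foldl (fun d c => d.insert (pvKey c.1 c.2.1) (if c.2.2 then 0 else 1)) d) a b by
    have := h claireTab PySem.Dict.empty
    simpa [compare_cost, pvCostDict, pvLook, PySem.Dict.getD_empty] using this
  intro ct
  induction ct with
  | nil => intro d; simp [pvLook]
  | cons c t ih =>
    intro d
    simp only [List.foldl_cons]
    have hkey : (if (c.1 = a ∧ c.2.1 = b) ∨ (c.2.1 = a ∧ c.1 = b) then (if c.2.2 then 0 else 1)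
        else d.getD (pvKey a b) 0)
        = (d.insert (pvKey c.1 c.2.1) (if c.2.2 then (0:Int) else 1)).getD (pvKey a b) 0 := by
      rw [PySem.Dict.getD_insert]
      by_cases h : pvKey c.1 c.2.1 = pvKey a b
      · rw [if_pos ((pvKey_match c.1 c.2.1 a b).2 h), if_pos h.symm]
      · rw [if_neg (fun hm => h ((pvKey_match c.1 c.2.1 a b).1 hm)),
            if_neg (fun he => h he.symm)]
    rw [hkey, ih]

-- A's split cost at index i (definitionally A's cost expression).
def pvS (claireTab : List (Int × Int × Bool)) (arr : List Int) (i : Nat) : Int :=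
  ((arr.take i).map (fun x => ((arr.drop i).map (fun y => compare_cost x y claireTab)).sum)).sum

-- incremental recurrence for the split cost
theorem pvS_succ (claireTab : List (Int × Int × Bool)) (arr : List Int) (i : Nat)
    (hi : i < arr.length) :
    pvS claireTab arr (i + 1)
      = pvS claireTab arr i
        + ((arr.drop (i + 1)).map (fun y => compare_cost arr[i] y claireTab)).sum
        - ((arr.take i).map (fun x => compare_cost x arr[i] claireTab)).sum := by
  unfold pvS
  rw [List.take_add_one, List.drop_eq_getElem_cons hi]
  simp only [List.getElem?_eq_getElem hi, Option.toList_some, List.map_append, List.sum_append,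
    List.map_cons, List.sum_cons, List.map_nil, List.sum_nil, add_zero]
  rw [PySem.List.sum_map_add_int]
  omega

theorem pvStepA_some (claireTab : List (Int × Int × Bool)) (arr : List Int)
    (bc : Int) (p : List Int × List Int) (i : Nat) :
    pvStepA claireTab arr (some bc, some p) i
      = if pvS claireTab arr i < bc then
          (some (pvS claireTab arr i), some (arr.take i, arr.drop i))
        else (some bc, some p) := rfl

theorem pvStepA_none (claireTab : List (Int × Int × Bool)) (arr : List Int) (i : Nat) :
    pvStepA claireTab arr (none, none) i
      = (some (pvS claireTab arr i), some (arr.take i, arr.drop i)) := rfl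

theorem pyGetD_in_range (arr : List Int) (j : Nat) (hj : j < arr.length) :
    PySem.List.pyGetD arr (j : Int) 0 = arr[j] := by
  rw [PySem.List.pyGetD_natCast]
  simp [List.getD, List.getElem?_eq_getElem hj]

-- the two loops, run in lockstep (B's index i corresponds to A's index i+1)
theorem pv_loop (claireTab : List (Int × Int × Bool)) (arr : List Int)
    (d : PySem.Dict (Int × Int) Int) (hd : d = pvCostDict claireTab) :
    ∀ (len j : Nat) (bc cur : Int) (bi : Nat),
      cur = pvS claireTab arr j → j + len < arr.length →
      ((List.range' (j + 1) len).foldl (pvStepA claireTab arr)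
        (some bc, some (arr.take bi, arr.drop bi))).2
      = some (arr.take ((List.range' j len).foldl (pvStepB d arr) (cur, bc, bi)).2.2,
              arr.drop ((List.range' j len).foldl (pvStepB d arr) (cur, bc, bi)).2.2) := by
  intro len
  induction len with
  | zero => intro j bc cur bi hcur hlt; simp
  | succ len ih =>
    intro j bc cur bi hcur hlt
    have hj : j < arr.length := by omega
    have hval : cur + ((arr.drop (j + 1)).map (fun y => pvLook d arr[j] y)).sum
        - ((arr.take j).map (fun x => pvLook d x arr[j])).sum = pvS claireTab arr (j + 1) := by
      rw [hcur, hd, pvS_succ claireTab arr j hj]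
      simp only [compare_cost_eq_look]
    have hB : pvStepB d arr (cur, bc, bi) j
        = if pvS claireTab arr (j + 1) < bc then
            (pvS claireTab arr (j + 1), pvS claireTab arr (j + 1), j + 1)
          else (pvS claireTab arr (j + 1), bc, bi) := by
      simp only [pvStepB, pyGetD_in_range arr j hj, hval]
    rw [List.range'_succ, List.range'_succ]
    simp only [List.foldl_cons]
    rw [pvStepA_some, hB]
    by_cases hlt2 : pvS claireTab arr (j + 1) < bc
    · rw [if_pos hlt2, if_pos hlt2]
      exact ih (j + 1) (pvS claireTab arr (j + 1)) (pvS claireTab arr (j + 1)) (j + 1) rfl (by omega)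
    · rw [if_neg hlt2, if_neg hlt2]
      exact ih (j + 1) bc (pvS claireTab arr (j + 1)) bi rfl (by omega)

theorem pvCur0_eq (claireTab : List (Int × Int × Bool)) (arr : List Int) (h : 0 < arr.length) :
    pvCur0 (pvCostDict claireTab) arr = pvS claireTab arr 1 := by
  unfold pvCur0 pvS
  have hg := pyGetD_in_range arr 0 h
  simp only [Nat.cast_zero] at hg
  rw [show (1:Nat) = 0 + 1 from rfl, List.take_add_one]
  simp [hg, List.getElem?_eq_getElem h, compare_cost_eq_look]

-- ===== VERDICT (by name: the statement is the Claim_ definition above) =====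
theorem split_with_min_cost_spec : Claim_equal_split_with_min_cost := by
  intro arr claireTab _
  show split_with_min_cost arr claireTab = split_with_min_cost_alt arr claireTab
  by_cases hn : arr.length < 2
  · have h1 : arr.length - 1 = 0 := by omega
    simp [split_with_min_cost, split_with_min_cost_alt, h1, hn]
  · have hlen : 2 ≤ arr.length := by omega
    simp only [split_with_min_cost, split_with_min_cost_alt, if_neg hn]
    have hr : List.range' 1 (arr.length - 1) = 1 :: List.range' 2 (arr.length - 2) := by
      rw [show arr.length - 1 = (arr.length - 2) + 1 from by omega, List.range'_succ]
    rw [hr]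
    simp only [List.foldl_cons, pvStepA_none]
    have h0 : (0:Nat) < arr.length := by omega
    rw [show arr.take 1 = arr.take 1 from rfl]
    have := pv_loop claireTab arr (pvCostDict claireTab) rfl (arr.length - 2) 1
      (pvS claireTab arr 1) (pvS claireTab arr 1) 1 rfl (by omega)
    rw [pvCur0_eq claireTab arr h0]
    exact this
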